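-- pv_equiv track=rewrite | github.com/sattler/ark-ecs | src/utils.py | calculate_biggest_key_in_subnet
-- ===== SOURCE A (Python) =====
-- def bytes_for_ip_version(is_ipv6: bool) -> int:
--     return 16 if is_ipv6 else 4
--
-- def calculate_biggest_key_in_subnet(ip_as_short_field: list[int], is_ipv6: bool) -> int:
--     ip_as_int = 0
--     for bit in ip_as_short_field:
--         ip_as_int = (ip_as_int << 1) + bit
--
--     ip_bytes = bytes_for_ip_version(is_ipv6) // 2 if is_ipv6 else bytes_for_ip_version(is_ipv6)
--     for _ in range(ip_bytes * 8 - len(ip_as_short_field)):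
--         ip_as_int = (ip_as_int << 1) | 1
--
--     return ip_as_int
-- ===== SOURCE B (Python) =====
-- def calculate_biggest_key_in_subnet(ip_as_short_field: list[int], is_ipv6: bool) -> int:
--     n = len(ip_as_short_field)
--     ip_as_int = sum(bit << (n - 1 - i) for i, bit in enumerate(ip_as_short_field))
--     ip_bytes = 8 if is_ipv6 else 4
--     k = max(0, ip_bytes * 8 - n)
--     return (ip_as_int << k) + ((1 << k) - 1)
-- ===== Notes on version B (the rewrite author's own statement) =====
-- stated objective: simpler
-- what changed: Replaces A's Horner-style accumulation loop by a positional weighted sum over enumerate, and replaces A's bit-by-bit padding loop by the closed form (ip << k) + ((1 << k) - 1) with k clamped at 0.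
import Mathlib
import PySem

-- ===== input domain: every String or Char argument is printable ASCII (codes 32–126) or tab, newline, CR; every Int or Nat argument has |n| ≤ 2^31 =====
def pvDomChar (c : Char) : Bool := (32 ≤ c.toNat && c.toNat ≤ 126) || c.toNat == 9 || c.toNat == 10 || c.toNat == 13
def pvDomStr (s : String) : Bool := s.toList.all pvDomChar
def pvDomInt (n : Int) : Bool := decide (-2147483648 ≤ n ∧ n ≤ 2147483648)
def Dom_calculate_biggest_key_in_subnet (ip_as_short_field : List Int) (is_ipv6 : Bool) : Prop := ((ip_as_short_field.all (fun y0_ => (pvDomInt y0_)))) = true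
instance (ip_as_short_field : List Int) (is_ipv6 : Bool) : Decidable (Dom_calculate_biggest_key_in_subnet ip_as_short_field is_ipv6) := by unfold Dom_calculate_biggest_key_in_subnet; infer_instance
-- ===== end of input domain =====

-- B replaces A's Horner fold by a positional weighted sum and the bit-by-bit padding
-- loop by the closed form (ip << k) + ((1 << k) - 1), k clamped at 0 (objective: simpler).

-- ===== PORT A =====
def bytes_for_ip_version (is_ipv6 : Bool) : Int := if is_ipv6 then 16 else 4

def calculate_biggest_key_in_subnet (ip_as_short_field : List Int) (is_ipv6 : Bool) : Int :=
  -- (ip << 1) + bit ported as ip * 2 + bit (exact: x << 1 = x * 2 on Python ints)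
  let ip_as_int := ip_as_short_field.foldl (fun acc bit => acc * 2 + bit) 0
  let ip_bytes : Int :=
    if is_ipv6 then PySem.Int.floordiv (bytes_for_ip_version is_ipv6) 2
    else bytes_for_ip_version is_ipv6
  -- (ip << 1) | 1 ported as ip * 2 + 1 (exact: the low bit of ip << 1 is 0)
  (PySem.List.pyRange 0 (ip_bytes * 8 - (ip_as_short_field.length : Int)) 1).foldl
    (fun acc _ => acc * 2 + 1) ip_as_int

-- ===== PORT B =====
def calculate_biggest_key_in_subnet_alt (ip_as_short_field : List Int) (is_ipv6 : Bool) : Int :=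
  let n : Int := ip_as_short_field.length
  -- bit << (n - 1 - i): the exponent n - 1 - i is ≥ 0 for every enumerated index, so
  -- porting the shift as multiplication by 2 ^ (n - 1 - i).toNat is exact
  let ip_as_int :=
    ((PySem.List.enumerate ip_as_short_field 0).map
      (fun p => p.2 * 2 ^ (n - 1 - p.1).toNat)).sum
  let ip_bytes : Int := if is_ipv6 then 8 else 4
  let k := max 0 (ip_bytes * 8 - n)
  -- (ip << k) + ((1 << k) - 1) with k ≥ 0, ported via 2 ^ k.toNat (exact)
  ip_as_int * 2 ^ k.toNat + (2 ^ k.toNat - 1)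

-- ===== PRECONDITION & SPEC =====
def Spec_calculate_biggest_key_in_subnet (ip_as_short_field : List Int) (is_ipv6 : Bool) (out : Int) : Prop := out = calculate_biggest_key_in_subnet_alt ip_as_short_field is_ipv6
instance (ip_as_short_field : List Int) (is_ipv6 : Bool) (out : Int) : Decidable (Spec_calculate_biggest_key_in_subnet ip_as_short_field is_ipv6 out) := by unfold Spec_calculate_biggest_key_in_subnet; infer_instance

-- ===== CLAIM (what is proved, stated in full; the proofs are below) =====
def Claim_equal_calculate_biggest_key_in_subnet : Prop := ∀ (ip_as_short_field : List Int) (is_ipv6 : Bool), Dom_calculate_biggest_key_in_subnet ip_as_short_field is_ipv6 → Spec_calculate_biggest_key_in_subnet ip_as_short_field is_ipv6 (calculate_biggest_key_in_subnet ip_as_short_field is_ipv6)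

-- ===== LEMMAS AND PROOFS =====

-- A's Horner fold equals the positional weighted sum (generalized over start index and accumulator).
theorem horner_eq_posSum (xs : List Int) : ∀ (s a : Int),
    xs.foldl (fun acc bit => acc * 2 + bit) a
      = a * 2 ^ xs.length
        + ((PySem.List.enumerate xs s).map
            (fun p => p.2 * 2 ^ (s + (xs.length : Int) - 1 - p.1).toNat)).sum := by
  induction xs with
  | nil => intro s a; simp [PySem.List.enumerate_nil]
  | cons x xs ih =>
    intro s a
    rw [PySem.List.enumerate_cons]
    simp only [List.foldl_cons, List.map_cons, List.sum_cons, List.length_cons]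
    rw [ih (s + 1) (a * 2 + x)]
    have h1 : (s + ((xs.length : Int) + 1) - 1 - s).toNat = xs.length := by omega
    have hmap : ((PySem.List.enumerate xs (s + 1)).map
          (fun p => p.2 * 2 ^ (s + 1 + (xs.length : Int) - 1 - p.1).toNat))
        = ((PySem.List.enumerate xs (s + 1)).map
          (fun p => p.2 * 2 ^ (s + ((xs.length : Int) + 1) - 1 - p.1).toNat)) := by
      apply List.map_congr_left; intro p _
      have : (s + 1 + (xs.length : Int) - 1 - p.1).toNat
           = (s + ((xs.length : Int) + 1) - 1 - p.1).toNat := by omega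
      rw [this]
    push_cast
    push_cast at hmap
    rw [hmap, h1]
    ring

-- Folding acc ↦ acc * 2 + 1 over a list of length m is the closed form x * 2^m + (2^m - 1).
theorem pad_fold_closed (l : List Int) : ∀ (x : Int),
    l.foldl (fun acc _ => acc * 2 + 1) x = x * 2 ^ l.length + (2 ^ l.length - 1) := by
  induction l with
  | nil => intro x; simp
  | cons y l ih =>
    intro x
    simp only [List.foldl_cons, List.length_cons, ih (x * 2 + 1)]
    ring

-- ===== VERDICT (by name: the statement is the Claim_ definition above) =====
theorem calculate_biggest_key_in_subnet_spec : Claim_equal_calculate_biggest_key_in_subnet := by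
  intro xs v6 _
  unfold Spec_calculate_biggest_key_in_subnet
  unfold calculate_biggest_key_in_subnet calculate_biggest_key_in_subnet_alt
  simp only
  have hbytes :
      (if v6 then PySem.Int.floordiv (bytes_for_ip_version v6) 2 else bytes_for_ip_version v6)
        = (if v6 then (8 : Int) else 4) := by
    cases v6 <;> simp [bytes_for_ip_version, PySem.Int.floordiv]
  rw [hbytes]
  set ipb : Int := if v6 then (8 : Int) else 4 with hipb
  set m : Int := ipb * 8 - (xs.length : Int) with hm
  have hk : (max 0 m).toNat = m.toNat := by omega
  rw [pad_fold_closed, PySem.List.length_pyRange_one]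
  have hsum := horner_eq_posSum xs 0 0
  simp only [zero_mul, zero_add] at hsum ⊢
  rw [hsum, hk]
  norm_num
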